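-- pv_equiv track=rewrite | github.com/meldaravaniel/hello-operator | src/menu.py | _t9_digit_for_name
-- ===== SOURCE A (Python) =====
-- _T9_GROUPS = {
--     1: set("ABCabc"),
--     2: set("DEFdef"),
--     3: set("GHIghi"),
--     4: set("JKLjkl"),
--     5: set("MNOmno"),
--     6: set("PQRpqr"),
--     7: set("STUstu"),
--     8: set("VWXYZvwxyz"),
-- }
--
-- _T9_DIGIT_CHARS = set("0123456789")
--
-- _ARTICLES = ("the ", "a ", "an ")
--
-- def _strip_article(name: str) -> str:
--     """Strip leading articles for T9 indexing (case-insensitive)."""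
--     lower = name.lower()
--     for article in _ARTICLES:
--         if lower.startswith(article):
--             return name[len(article):]
--     return name
--
-- def _t9_digit_for_name(name: str) -> int:
--     """Return the T9 digit (1–8) for the first indexable character of name."""
--     stripped = _strip_article(name)
--     if not stripped:
--         return 8
--     first = stripped[0]
--     if first in _T9_DIGIT_CHARS:
--         return int(first) if first != '0' else 8  # '0' falls under 8
--     for digit, chars in _T9_GROUPS.items():
--         if first in chars:
--             return digit
--     return 8  # special chars → 8
-- ===== SOURCE B (Python) =====
-- _ARTICLES = ("the ", "a ", "an ")
--
-- def _strip_article(name: str) -> str: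
--     """Strip leading articles for T9 indexing (case-insensitive)."""
--     lower = name.lower()
--     n = next((len(a) for a in _ARTICLES if lower.startswith(a)), 0)
--     return name[n:]
--
-- def _t9_digit_for_name(name: str) -> int:
--     """Closed-form arithmetic instead of scanning the 8 group tables."""
--     stripped = _strip_article(name)
--     if not stripped:
--         return 8
--     c = stripped[0].lower()
--     if c.isdigit():
--         return int(c) or 8  # '0' falls under 8
--     if 'a' <= c <= 'z':
--         return min((ord(c) - ord('a')) // 3 + 1, 8)
--     return 8  # special chars -> 8
-- ===== Notes on version B (the rewrite author's own statement) =====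
-- stated objective: simpler
-- what changed: For letters, the scan over the 8 group tables is replaced by a closed-form formula (alphabet offset of the lowercased first character floor-divided by 3, plus 1, capped at 8), and the article-stripping loop becomes a single slice by the matched prefix length.
import Mathlib
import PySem

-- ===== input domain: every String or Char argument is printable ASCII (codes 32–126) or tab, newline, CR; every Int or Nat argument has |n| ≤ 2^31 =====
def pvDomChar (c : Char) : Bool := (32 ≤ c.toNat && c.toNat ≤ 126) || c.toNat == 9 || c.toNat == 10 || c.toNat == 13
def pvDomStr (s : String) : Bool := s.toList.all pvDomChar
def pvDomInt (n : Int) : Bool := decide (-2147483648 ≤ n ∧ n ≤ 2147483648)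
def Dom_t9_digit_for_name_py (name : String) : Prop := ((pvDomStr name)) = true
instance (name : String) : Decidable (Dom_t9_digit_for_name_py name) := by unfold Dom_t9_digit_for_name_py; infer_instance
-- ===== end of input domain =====

-- B replaces A's 8-group table scan by a closed-form arithmetic digit formula, and the
-- article-stripping loop by a single slice of the matched prefix length (objective: simpler).

-- ===== PORT A =====
-- _T9_GROUPS, in dict insertion order (digit, member chars)
def pvT9Groups : List (Int × List Char) :=
  [(1, "ABCabc".toList), (2, "DEFdef".toList), (3, "GHIghi".toList), (4, "JKLjkl".toList),
   (5, "MNOmno".toList), (6, "PQRpqr".toList), (7, "STUstu".toList), (8, "VWXYZvwxyz".toList)]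

def pvT9DigitChars : List Char := "0123456789".toList

def pvArticles : List (List Char) := ["the ".toList, "a ".toList, "an ".toList]

-- the 'for article in _ARTICLES' loop of _strip_article: first matching article strips its length
def pvStripLoopA (name lower : List Char) : List (List Char) → List Char
  | [] => name
  | a :: rest =>
      if PySem.Chars.startswith lower a then
        PySem.List.slice name (some (a.length : Int)) none
      else pvStripLoopA name lower rest

def pvStripArticleA (name : List Char) : List Char :=
  pvStripLoopA name (PySem.Chars.lower name) pvArticles

-- the 'for digit, chars in _T9_GROUPS.items()' scan; falls through to 8 for special chars
def pvGroupScan (first : Char) : List (Int × List Char) → Int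
  | [] => 8
  | (d, chars) :: rest => if chars.contains first then d else pvGroupScan first rest

def t9_digit_for_name_py (name : String) : Int :=
  let stripped := pvStripArticleA name.toList
  match stripped with
  | [] => 8
  | first :: _ =>
      if pvT9DigitChars.contains first then
        (if first ≠ '0' then (PySem.Int.ofChars? [first]).getD 0 else 8)
      else pvGroupScan first pvT9Groups

-- ===== PORT B =====
-- length of the first matching article prefix, else 0 (the 'next(… , 0)' in Source B)
def pvArticleLenB (lower : List Char) : Nat :=
  match pvArticles.find? (fun a => PySem.Chars.startswith lower a) with
  | some a => a.length
  | none => 0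

def pvStripArticleB (name : List Char) : List Char :=
  PySem.List.slice name (some ((pvArticleLenB (PySem.Chars.lower name) : Nat) : Int)) none

def t9_digit_for_name_py_alt (name : String) : Int :=
  match pvStripArticleB name.toList with
  | [] => 8
  | c0 :: _ =>
      let c := PySem.Chars.lowerChar c0
      if PySem.Chars.isdigit c then
        (let v : Int := (PySem.Int.ofChars? [c]).getD 0
         if v = 0 then 8 else v)
      else if 'a' ≤ c ∧ c ≤ 'z' then
        min (PySem.Int.floordiv ((c.toNat : Int) - ('a'.toNat : Int)) 3 + 1) 8
      else 8

-- ===== PRECONDITION & SPEC =====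
def Spec_t9_digit_for_name_py (name : String) (out : Int) : Prop := out = t9_digit_for_name_py_alt name
instance (name : String) (out : Int) : Decidable (Spec_t9_digit_for_name_py name out) := by unfold Spec_t9_digit_for_name_py; infer_instance

-- ===== CLAIM (what is proved, stated in full; the proofs are below) =====
def Claim_equal_t9_digit_for_name_py : Prop := ∀ (name : String), Dom_t9_digit_for_name_py name → Spec_t9_digit_for_name_py name (t9_digit_for_name_py name)

-- ===== LEMMAS AND PROOFS =====

-- the two article-stripping helpers agree
theorem strip_eq (l : List Char) : pvStripArticleA l = pvStripArticleB l := by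
  unfold pvStripArticleA pvStripArticleB pvArticleLenB pvArticles
  simp only [show ("the ".toList = ['t','h','e',' ']) from rfl,
    show ("a ".toList = ['a',' ']) from rfl, show ("an ".toList = ['a','n',' ']) from rfl]
  by_cases h1 : PySem.Chars.startswith (PySem.Chars.lower l) ['t', 'h', 'e', ' ']
  · simp [pvStripLoopA, h1, List.find?]
  · by_cases h2 : PySem.Chars.startswith (PySem.Chars.lower l) ['a', ' ']
    · simp [pvStripLoopA, h1, h2, List.find?]
    · by_cases h3 : PySem.Chars.startswith (PySem.Chars.lower l) ['a', 'n', ' ']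
      · simp [pvStripLoopA, h1, h2, h3, List.find?]
      · simp [pvStripLoopA, h1, h2, h3, List.find?, PySem.List.slice, PySem.List.clampIdx]

-- per-character agreement of the digit branches, by exhaustion over the ASCII domain
set_option maxRecDepth 8192 in
theorem dig_eq_aux : ∀ n ∈ List.range 128,
    (if pvT9DigitChars.contains (Char.ofNat n) then
        (if Char.ofNat n ≠ '0' then (PySem.Int.ofChars? [Char.ofNat n]).getD 0 else 8)
      else pvGroupScan (Char.ofNat n) pvT9Groups)
    = (let c := PySem.Chars.lowerChar (Char.ofNat n)
       if PySem.Chars.isdigit c then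
         (let v : Int := (PySem.Int.ofChars? [c]).getD 0
          if v = 0 then 8 else v)
       else if 'a' ≤ c ∧ c ≤ 'z' then
         min (PySem.Int.floordiv ((c.toNat : Int) - ('a'.toNat : Int)) 3 + 1) 8
       else 8) := by decide

theorem dig_eq (c : Char) (hc : pvDomChar c = true) :
    (if pvT9DigitChars.contains c then
        (if c ≠ '0' then (PySem.Int.ofChars? [c]).getD 0 else 8)
      else pvGroupScan c pvT9Groups)
    = (let lc := PySem.Chars.lowerChar c
       if PySem.Chars.isdigit lc then
         (let v : Int := (PySem.Int.ofChars? [lc]).getD 0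
          if v = 0 then 8 else v)
       else if 'a' ≤ lc ∧ lc ≤ 'z' then
         min (PySem.Int.floordiv ((lc.toNat : Int) - ('a'.toNat : Int)) 3 + 1) 8
       else 8) := by
  have h128 : c.toNat < 128 := by
    unfold pvDomChar at hc; simp only [Bool.or_eq_true, Bool.and_eq_true, decide_eq_true_eq,
      beq_iff_eq] at hc
    omega
  have hofn : Char.ofNat c.toNat = c := Char.ofNat_toNat c
  have := dig_eq_aux c.toNat (by simpa using h128)
  rw [hofn] at this
  exact this

-- chars of the stripped list come from name (strip is identity or a slice)
theorem stripLoop_mem (l lower : List Char) :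
    ∀ (arts : List (List Char)) (c : Char), c ∈ pvStripLoopA l lower arts → c ∈ l
  | [], c, h => by simpa [pvStripLoopA] using h
  | a :: rest, c, h => by
      rw [pvStripLoopA] at h
      split_ifs at h with hh
      · exact PySem.List.mem_of_mem_slice _ _ _ h
      · exact stripLoop_mem l lower rest c h

theorem strip_mem (l : List Char) (c : Char) (h : c ∈ pvStripArticleA l) : c ∈ l :=
  stripLoop_mem l (PySem.Chars.lower l) pvArticles c h

-- ===== VERDICT (by name: the statement is the Claim_ definition above) =====
theorem t9_digit_for_name_py_spec : Claim_equal_t9_digit_for_name_py := by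
  intro name hdom
  unfold Spec_t9_digit_for_name_py t9_digit_for_name_py t9_digit_for_name_py_alt
  rw [strip_eq]
  cases h : pvStripArticleB name.toList with
  | nil => rfl
  | cons c rest =>
      have hmem : c ∈ name.toList := by
        apply strip_mem
        rw [strip_eq, h]; exact List.mem_cons_self ..
      have hc : pvDomChar c = true := by
        unfold Dom_t9_digit_for_name_py pvDomStr at hdom
        exact List.all_eq_true.mp hdom c hmem
      exact dig_eq c hc
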